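-- pv_equiv track=rewrite | github.com/dieret/codenames | codenames/words.py | remove_similar
-- ===== SOURCE A (Python) =====
-- def csort(dct):
--     return dict(sorted(dct.items(), key=lambda x: x[1], reverse=True))
--
-- def remove_similar(dct):
--     words = list(dct.keys())
--     words2 = words.copy()
--     for word in words:
--         for word2 in words:
--             if (
--                 word[:5] in word2
--                 and len(word) < len(word2)
--                 and not word == word2
--                 and word2 in words2
--             ):
--                 words2.remove(word2)
--     return csort({key: dct[key] for key in words2})
-- ===== SOURCE B (Python) =====
-- def remove_similar(dct):
--     # per-5-char-prefix minimum word length, built in one pass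
--     minlen = {}
--     for w in dct:
--         p = w[:5]
--         if p not in minlen or len(w) < minlen[p]:
--             minlen[p] = len(w)
--     kept = [
--         (k, v)
--         for k, v in dct.items()
--         if not any(l < len(k) and p in k for p, l in minlen.items())
--     ]
--     return dict(sorted(kept, key=lambda x: x[1], reverse=True))
-- ===== Notes on version B (the rewrite author's own statement) =====
-- stated objective: alternative
-- what changed: B replaces A's nested loops that mutate a copy of the key list via repeated 'in'/.remove with a one-pass dict of per-5-char-prefix minimum lengths followed by a single filtering comprehension over the items (the length pre-check and prefix dedup skip substring tests A always performs).
import Mathlib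
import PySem

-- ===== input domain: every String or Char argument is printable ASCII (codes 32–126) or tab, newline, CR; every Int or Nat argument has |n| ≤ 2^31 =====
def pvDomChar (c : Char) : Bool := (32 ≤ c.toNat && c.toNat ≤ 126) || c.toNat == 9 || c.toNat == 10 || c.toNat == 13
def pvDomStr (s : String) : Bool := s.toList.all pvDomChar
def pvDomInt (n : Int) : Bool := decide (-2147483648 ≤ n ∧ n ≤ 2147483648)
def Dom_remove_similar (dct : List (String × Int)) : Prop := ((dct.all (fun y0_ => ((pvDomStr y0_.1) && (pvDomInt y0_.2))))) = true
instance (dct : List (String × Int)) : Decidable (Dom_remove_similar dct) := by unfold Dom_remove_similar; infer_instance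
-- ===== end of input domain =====

-- B replaces A's nested remove-loops by a per-5-char-prefix minimum-length dict plus one filtering pass (alternative decomposition, same result).


-- ===== PORT A =====
-- word[:5]
def pfx5 (w : String) : String := PySem.Str.slice w none (some 5)

-- the if-condition of A's inner loop, in Python's order
def aCond (word word2 : String) (ws2 : List String) : Bool :=
  PySem.Str.isIn (pfx5 word) word2
    && decide (PySem.Str.len word < PySem.Str.len word2)
    && !(word == word2)
    && ws2.contains word2

-- The Python argument is a dict, so the assoc list is read through PySem.Dict.ofList
-- (unique keys, first position, last value — exactly Python's dict of those pairs).
-- words2.remove(word2) is List.erase (first occurrence); the final dict comprehension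
-- over the distinct keys of words2 followed by csort is the value-sorted pair list.
def remove_similar (dct : List (String × Int)) : List (String × Int) :=
  let d := PySem.Dict.ofList dct
  let words := d.keys
  let words2 := words.foldl (fun ws2 word =>
      words.foldl (fun ws2 word2 =>
        if aCond word word2 ws2 then ws2.erase word2 else ws2) ws2) words
  PySem.List.sorted (words2.map (fun k => (k, d.getD k 0))) (fun x => x.2) true

-- ===== PORT B =====
-- minlen: 5-char prefix ↦ minimum length of a word with that prefix (Source B's first loop)
def altMinlen (words : List String) : PySem.Dict String Int :=
  words.foldl (fun m w =>
    match m.get? (pfx5 w) with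
    | none => m.insert (pfx5 w) (PySem.Str.len w)
    | some l => if PySem.Str.len w < l then m.insert (pfx5 w) (PySem.Str.len w) else m)
    PySem.Dict.empty

def remove_similar_alt (dct : List (String × Int)) : List (String × Int) :=
  let d := PySem.Dict.ofList dct
  let minlen := altMinlen d.keys
  let kept := d.items.filter (fun kv =>
    !(minlen.items.any (fun pl =>
        decide (pl.2 < PySem.Str.len kv.1) && PySem.Str.isIn pl.1 kv.1)))
  PySem.List.sorted kept (fun x => x.2) true

-- ===== PRECONDITION & SPEC =====
def Spec_remove_similar (dct : List (String × Int)) (out : List (String × Int)) : Prop := out = remove_similar_alt dct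
instance (dct : List (String × Int)) (out : List (String × Int)) : Decidable (Spec_remove_similar dct out) := by unfold Spec_remove_similar; infer_instance

-- ===== CLAIM (what is proved, stated in full; the proofs are below) =====
def Claim_equal_remove_similar : Prop := ∀ (dct : List (String × Int)), Dom_remove_similar dct → Spec_remove_similar dct (remove_similar dct)

-- ===== LEMMAS AND PROOFS =====
-- the length/prefix part of A's condition (the membership test is handled by the fold lemmas)
def baseC (word x : String) : Bool :=
  PySem.Str.isIn (pfx5 word) x && decide (PySem.Str.len word < PySem.Str.len x) && !(word == x)

theorem aCond_eq (word w2 : String) (ws2 : List String) :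
    aCond word w2 ws2 = (baseC word w2 && ws2.contains w2) := rfl

theorem contains_cons_ne (a x : String) (l : List String) (h : x ≠ a) :
    (a :: l).contains x = l.contains x := by
  rw [List.contains_cons, beq_eq_false_iff_ne.mpr h, Bool.false_or]

theorem innerFold (word : String) (l ws2 : List String) (h : ws2.Nodup) :
    l.foldl (fun ws2 w2 => if aCond word w2 ws2 then ws2.erase w2 else ws2) ws2
      = ws2.filter (fun x => !(baseC word x && l.contains x)) := by
  induction l generalizing ws2 with
  | nil => simp
  | cons a l ih =>
    simp only [List.foldl_cons]
    by_cases hc : aCond word a ws2 = true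
    · rw [if_pos hc, ih _ (h.erase a), List.Nodup.erase_eq_filter h a, List.filter_filter]
      have hbase : baseC word a = true := by
        rw [aCond_eq] at hc; simp at hc; exact hc.1
      apply List.filter_congr; intro x hx
      by_cases hxa : x = a
      · subst hxa
        rw [List.contains_cons, BEq.rfl, Bool.true_or, hbase]
        simp
      · rw [contains_cons_ne a x l hxa, bne_iff_ne.mpr hxa, Bool.and_true]
    · rw [if_neg hc, ih _ h]
      apply List.filter_congr; intro x hx
      by_cases hxa : x = a
      · subst hxa
        have hb : baseC word x = false := by
          cases hb : baseC word x
          · rfl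
          · exact absurd (by rw [aCond_eq, hb, Bool.true_and]; simpa using hx) hc
        rw [hb, Bool.false_and, Bool.false_and]
      · rw [contains_cons_ne a x l hxa]

theorem outerFold (words outer ws2 : List String) (h : ws2.Nodup) :
    outer.foldl (fun ws2 word =>
        words.foldl (fun ws2 word2 => if aCond word word2 ws2 then ws2.erase word2 else ws2) ws2) ws2
      = ws2.filter (fun x => !(outer.any (fun w => baseC w x && words.contains x))) := by
  induction outer generalizing ws2 with
  | nil => simp
  | cons w outer ih =>
    simp only [List.foldl_cons]
    rw [innerFold w words ws2 h, ih _ (h.filter _), List.filter_filter]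
    apply List.filter_congr; intro x hx
    rw [List.any_cons]
    cases hb : (baseC w x && words.contains x) <;>
      cases ha : (outer.any fun w => baseC w x && words.contains x) <;> rfl

-- one step of Source B's minlen loop
def mlStep (m : PySem.Dict String Int) (w : String) : PySem.Dict String Int :=
  match m.get? (pfx5 w) with
  | none => m.insert (pfx5 w) (PySem.Str.len w)
  | some l => if PySem.Str.len w < l then m.insert (pfx5 w) (PySem.Str.len w) else m

theorem altMinlen_eq (words : List String) :
    altMinlen words = words.foldl mlStep PySem.Dict.empty := rfl

theorem mlStep_get? (d : PySem.Dict String Int) (w : String) (p : String) :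
    (mlStep d w).get? p =
      if p = pfx5 w then
        some (match d.get? (pfx5 w) with
              | none => PySem.Str.len w
              | some lv => if PySem.Str.len w < lv then PySem.Str.len w else lv)
      else d.get? p := by
  unfold mlStep
  cases hm : d.get? (pfx5 w) with
  | none =>
    exact PySem.Dict.get?_insert d (pfx5 w) p (PySem.Str.len w)
  | some lv =>
    by_cases hlt : PySem.Str.len w < lv
    · dsimp only
      rw [if_pos hlt, if_pos hlt, PySem.Dict.get?_insert]
    · dsimp only
      rw [if_neg hlt, if_neg hlt]
      by_cases hp : p = pfx5 w
      · rw [if_pos hp, hp, hm]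
      · rw [if_neg hp]

theorem mlStep_nodup (d : PySem.Dict String Int) (w : String) (hnd : d.keys.Nodup) :
    (mlStep d w).keys.Nodup := by
  unfold mlStep
  cases d.get? (pfx5 w) with
  | none => exact PySem.Dict.nodup_keys_insert _ _ _ hnd
  | some lv =>
    dsimp only
    by_cases hlt : PySem.Str.len w < lv
    · rw [if_pos hlt]; exact PySem.Dict.nodup_keys_insert _ _ _ hnd
    · rwa [if_neg hlt]

theorem mlFold (l : List String) (d : PySem.Dict String Int) (hnd : d.keys.Nodup) :
    (l.foldl mlStep d).keys.Nodup
    ∧ (∀ p v, (l.foldl mlStep d).get? p = some v →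
        d.get? p = some v ∨ ∃ w ∈ l, pfx5 w = p ∧ PySem.Str.len w = v)
    ∧ (∀ w ∈ l, ∃ v, (l.foldl mlStep d).get? (pfx5 w) = some v ∧ v ≤ PySem.Str.len w)
    ∧ (∀ p v, d.get? p = some v → ∃ v', (l.foldl mlStep d).get? p = some v' ∧ v' ≤ v) := by
  induction l generalizing d with
  | nil =>
    exact ⟨hnd, fun p v h => Or.inl h, by simp, fun p v h => ⟨v, h, le_refl v⟩⟩
  | cons w l ih =>
    obtain ⟨ih1, ih2, ih3, ih4⟩ := ih (mlStep d w) (mlStep_nodup d w hnd)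
    simp only [List.foldl_cons]
    refine ⟨ih1, ?_, ?_, ?_⟩
    · intro p v hv
      rcases ih2 p v hv with h1 | ⟨w', hw', hp, hl⟩
      · rw [mlStep_get? d w p] at h1
        by_cases hp : p = pfx5 w
        · rw [if_pos hp] at h1
          cases hm : d.get? (pfx5 w) with
          | none =>
            simp only [hm] at h1
            refine Or.inr ⟨w, List.mem_cons_self, hp.symm, ?_⟩
            simpa using h1
          | some lv =>
            by_cases hlt : PySem.Str.len w < lv
            · simp only [hm, hlt, if_true] at h1
              refine Or.inr ⟨w, List.mem_cons_self, hp.symm, ?_⟩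
              simpa using h1
            · simp only [hm, hlt, if_false] at h1
              refine Or.inl ?_
              rw [hp, hm]
              simpa using h1
        · rw [if_neg hp] at h1; exact Or.inl h1
      · exact Or.inr ⟨w', List.mem_cons_of_mem _ hw', hp, hl⟩
    · intro w' hw'
      rcases List.mem_cons.mp hw' with rfl | hw'
      · have hm1 : ∃ m, (mlStep d w').get? (pfx5 w') = some m ∧ m ≤ PySem.Str.len w' := by
          rw [mlStep_get? d w' (pfx5 w'), if_pos rfl]
          cases hm : d.get? (pfx5 w') with
          | none => exact ⟨PySem.Str.len w', rfl, le_refl _⟩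
          | some lv =>
            by_cases hlt : PySem.Str.len w' < lv
            · refine ⟨PySem.Str.len w', ?_, le_refl _⟩
              show some (if PySem.Str.len w' < lv then PySem.Str.len w' else lv)
                  = some (PySem.Str.len w')
              rw [if_pos hlt]
            · refine ⟨lv, ?_, by omega⟩
              show some (if PySem.Str.len w' < lv then PySem.Str.len w' else lv) = some lv
              rw [if_neg hlt]
        obtain ⟨m, hm, hmle⟩ := hm1
        obtain ⟨v', hv', hv'le⟩ := ih4 _ m hm
        exact ⟨v', hv', le_trans hv'le hmle⟩
      · exact ih3 w' hw'
    · intro p v hv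
      have hs : ∃ m, (mlStep d w).get? p = some m ∧ m ≤ v := by
        rw [mlStep_get? d w p]
        by_cases hp : p = pfx5 w
        · rw [if_pos hp, ← hp, hv]
          by_cases hlt : PySem.Str.len w < v
          · refine ⟨PySem.Str.len w, ?_, by omega⟩
            show some (if PySem.Str.len w < v then PySem.Str.len w else v)
                = some (PySem.Str.len w)
            rw [if_pos hlt]
          · refine ⟨v, ?_, le_refl v⟩
            show some (if PySem.Str.len w < v then PySem.Str.len w else v) = some v
            rw [if_neg hlt]
        · rw [if_neg hp]; exact ⟨v, hv, le_refl v⟩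
      obtain ⟨m, hm, hmle⟩ := hs
      obtain ⟨v', hv', hv'le⟩ := ih4 p m hm
      exact ⟨v', hv', le_trans hv'le hmle⟩

theorem len_lt_ne (w x : String) (h : PySem.Str.len w < PySem.Str.len x) : (w == x) = false := by
  apply beq_eq_false_iff_ne.mpr
  intro he
  rw [he] at h
  exact absurd h (lt_irrefl _)

theorem pred_eq (words : List String) (x : String) (hx : x ∈ words) :
    (words.any fun w => baseC w x && words.contains x)
      = ((altMinlen words).items.any fun pl =>
          decide (pl.2 < PySem.Str.len x) && PySem.Str.isIn pl.1 x) := by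
  obtain ⟨hnd, hM1, hM2, -⟩ := mlFold words PySem.Dict.empty PySem.Dict.nodup_keys_empty
  rw [← altMinlen_eq] at hnd hM1 hM2
  have hc : words.contains x = true := by simpa using hx
  apply Bool.eq_iff_iff.mpr
  constructor
  · intro hA
    obtain ⟨w, hw, hwB⟩ := List.any_eq_true.mp hA
    rw [hc, Bool.and_true] at hwB
    unfold baseC at hwB
    simp only [Bool.and_eq_true, decide_eq_true_eq] at hwB
    obtain ⟨⟨hin, hlt⟩, -⟩ := hwB
    obtain ⟨v, hv, hvle⟩ := hM2 w hw
    apply List.any_eq_true.mpr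
    refine ⟨(pfx5 w, v), (PySem.Dict.get?_eq_some_iff_mem_items _ _ _ hnd).mp hv, ?_⟩
    have hvlt : v < PySem.Str.len x := lt_of_le_of_lt hvle hlt
    rw [decide_eq_true hvlt, Bool.true_and]
    exact hin
  · intro hB
    obtain ⟨⟨p, v⟩, hmem, hpv⟩ := List.any_eq_true.mp hB
    simp only [Bool.and_eq_true, decide_eq_true_eq] at hpv
    obtain ⟨hlt1, hin⟩ := hpv
    have hg := (PySem.Dict.get?_eq_some_iff_mem_items _ p v hnd).mpr hmem
    rcases hM1 p v hg with h | ⟨w, hw, hp, hl⟩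
    · rw [PySem.Dict.get?_empty] at h; exact absurd h (by simp)
    · have hlt : PySem.Str.len w < PySem.Str.len x := by rw [hl]; exact hlt1
      apply List.any_eq_true.mpr
      refine ⟨w, hw, ?_⟩
      rw [hc, Bool.and_true]
      unfold baseC
      rw [hp, hin, decide_eq_true hlt, len_lt_ne w x hlt]
      rfl

-- ===== VERDICT (by name: the statement is the Claim_ definition above) =====
theorem remove_similar_spec : Claim_equal_remove_similar := by
  intro dct _
  unfold Spec_remove_similar
  simp only [remove_similar, remove_similar_alt]
  have hnd := PySem.Dict.nodup_keys_ofList dct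
  rw [outerFold (PySem.Dict.ofList dct).keys (PySem.Dict.ofList dct).keys (PySem.Dict.ofList dct).keys hnd]
  rw [PySem.Dict.items_eq_map_keys (PySem.Dict.ofList dct) hnd 0, List.filter_map]
  congr 1
  congr 1
  apply List.filter_congr
  intro x hx
  simp only [Function.comp]
  rw [pred_eq (PySem.Dict.ofList dct).keys x hx]
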